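-- pv_equiv track=rewrite | github.com/Robert-Dobry/Prange | src/func.py | remainder_division
-- ===== SOURCE A (Python) =====
-- def remainder_division(a,b):
--     count = 0
--     incr = a
--     remainder = a-b
--     while(a <= b):
--         count+=1
--         a+=incr
--     remainder = b - (a - incr)
--     return count,remainder
-- ===== SOURCE B (Python) =====
-- def remainder_division(a, b):
--     # Binary (shift-and-subtract) long division: repeatedly double a up to the
--     # largest multiple a*2^k that still fits under the running remainder, then
--     # subtract it, accumulating the quotient in powers of two.
--     count = 0
--     r = b
--     while a <= r:
--         step = a
--         q = 1
--         while step + step <= r: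
--             step += step
--             q += q
--         r -= step
--         count += q
--     return count, r
-- ===== Notes on version B (the rewrite author's own statement) =====
-- stated objective: faster
-- what changed: B performs binary (shift-and-subtract) long division -- repeatedly doubling the divisor to the largest a*2^k that fits under the running remainder and subtracting it -- instead of A's unary repeated addition of a, while keeping the same loop-based divergence behaviour for a <= 0.
import Mathlib
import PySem

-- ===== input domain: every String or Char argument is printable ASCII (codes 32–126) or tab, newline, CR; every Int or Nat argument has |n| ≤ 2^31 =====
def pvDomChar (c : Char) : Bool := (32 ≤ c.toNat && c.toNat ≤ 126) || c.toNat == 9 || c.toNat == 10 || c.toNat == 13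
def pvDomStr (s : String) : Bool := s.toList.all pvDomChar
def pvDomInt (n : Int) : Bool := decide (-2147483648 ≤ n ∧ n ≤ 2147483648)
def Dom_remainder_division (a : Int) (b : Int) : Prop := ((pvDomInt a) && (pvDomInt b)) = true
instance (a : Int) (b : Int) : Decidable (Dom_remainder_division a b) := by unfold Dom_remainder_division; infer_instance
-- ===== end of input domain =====

-- B replaces A's unary repeated addition with binary shift-and-subtract long division
-- (double the divisor to the largest a*2^k fitting under the running remainder, subtract it);
-- objective: faster (fewer loop iterations). Pre_ excludes exactly the inputs where the
-- Python A loops forever (a ≤ 0 and a ≤ b); B loops forever on the same inputs.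

-- ===== PORT A =====
-- while (a <= b): count += 1; a += incr.  Fuel b.toNat+1 suffices wherever the Python loop terminates.
def remDivLoopA (incr b : Int) : Nat → Int → Int → Int × Int
  | 0, x, count => (count, x)
  | n+1, x, count => if x ≤ b then remDivLoopA incr b n (x + incr) (count + 1) else (count, x)

def remainder_division (a : Int) (b : Int) : Int × Int :=
  let incr := a
  let p := remDivLoopA incr b (b.toNat + 1) a 0
  (p.1, b - (p.2 - incr))

-- ===== PORT B =====
-- inner: while (step + step <= r): step += step; q += q.
def remDivInnerB (r : Int) : Nat → Int → Int → Int × Int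
  | 0, step, q => (step, q)
  | m+1, step, q => if step + step ≤ r then remDivInnerB r m (step + step) (q + q) else (step, q)

-- outer: while (a <= r): step,q := inner(a,1); r -= step; count += q.
def remDivOuterB (a : Int) (m : Nat) : Nat → Int → Int → Int × Int
  | 0, r, count => (count, r)
  | n+1, r, count =>
    if a ≤ r then
      let p := remDivInnerB r m a 1
      remDivOuterB a m n (r - p.1) (count + p.2)
    else (count, r)

def remainder_division_alt (a : Int) (b : Int) : Int × Int :=
  remDivOuterB a (b.toNat + 1) (b.toNat + 1) b 0

-- ===== PRECONDITION & SPEC =====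
-- Pre_ excludes exactly the inputs (a ≤ 0 with a ≤ b) on which the Python A never returns
-- (its while loop runs forever); B's loop runs forever on exactly the same inputs.
def Pre_remainder_division (a : Int) (b : Int) : Prop := 0 < a ∨ b < a
instance (a : Int) (b : Int) : Decidable (Pre_remainder_division a b) := by unfold Pre_remainder_division; infer_instance

def pvWitness_remainder_division : Int × Int := (3, 10)

def Spec_remainder_division (a : Int) (b : Int) (out : Int × Int) : Prop := out = remainder_division_alt a b
instance (a : Int) (b : Int) (out : Int × Int) : Decidable (Spec_remainder_division a b out) := by unfold Spec_remainder_division; infer_instance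

-- ===== CLAIM (what is proved, stated in full; the proofs are below) =====
def Claim_equal_remainder_division : Prop := ∀ (a : Int) (b : Int), Dom_remainder_division a b → Pre_remainder_division a b → Spec_remainder_division a b (remainder_division a b)

-- ===== LEMMAS AND PROOFS =====

-- A's loop: starting at x with enough fuel, it returns (c + k, x + incr*k) where the final
-- value just passed b (and, if the loop ran, its predecessor had not).
theorem remDivLoopA_spec (incr b : Int) (h : 0 < incr) :
    ∀ (n : Nat) (x c : Int), b - x < incr * n →
      ∃ k : Int, remDivLoopA incr b n x c = (c + k, x + incr * k) ∧ 0 ≤ k ∧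
        b < x + incr * k ∧ (x ≤ b → x + incr * k - incr ≤ b) ∧ (¬ x ≤ b → k = 0) := by
  intro n
  induction n with
  | zero =>
    intro x c hfuel
    refine ⟨0, by simp [remDivLoopA], by omega, by simpa using (by omega : b < x), by omega, fun _ => rfl⟩
  | succ n ih =>
    intro x c hfuel
    by_cases hx : x ≤ b
    · have hfuel' : b - (x + incr) < incr * n := by
        have : incr * ((n : Int) + 1) = incr * n + incr := by ring
        push_cast at hfuel ⊢
        omega
      obtain ⟨k', hres, hk0, hlt, hle, hz⟩ := ih (x + incr) (c + 1) hfuel'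
      refine ⟨k' + 1, ?_, by omega, ?_, ?_, fun hc => absurd hx hc⟩
      · simp only [remDivLoopA, if_pos hx, hres, Prod.mk.injEq]
        constructor <;> ring
      · have : x + incr * (k' + 1) = x + incr + incr * k' := by ring
        omega
      · intro _
        by_cases hx' : x + incr ≤ b
        · have := hle hx'
          have : x + incr * (k' + 1) - incr = x + incr + incr * k' - incr := by ring
          omega
        · have := hz hx'
          subst this
          have : x + incr * ((0:Int) + 1) - incr = x := by ring
          omega
    · exact ⟨0, by simp [remDivLoopA, if_neg hx], by omega,
        by simpa using (by omega : b < x), fun hc => absurd hc hx, fun _ => rfl⟩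

-- B's inner loop: starting from a multiple step = a*q0 ≤ r with enough fuel, it returns the
-- largest doubled multiple a*q with a*q ≤ r < 2*(a*q).
theorem remDivInnerB_spec (a r : Int) (ha : 0 < a) :
    ∀ (m : Nat) (step q0 : Int), step = a * q0 → 1 ≤ q0 → step ≤ r → r < step * 2 ^ m →
      ∃ q : Int, remDivInnerB r m step q0 = (a * q, q) ∧ 1 ≤ q ∧ a * q ≤ r ∧ r < 2 * (a * q) := by
  intro m
  induction m with
  | zero =>
    intro step q0 hs hq hsr hfuel
    simp only [pow_zero, mul_one] at hfuel
    omega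
  | succ m ih =>
    intro step q0 hs hq hsr hfuel
    by_cases hd : step + step ≤ r
    · have hfuel' : r < (step + step) * 2 ^ m := by
        have : step * 2 ^ (m + 1) = (step + step) * 2 ^ m := by ring
        omega
      obtain ⟨q, hres, h1, h2, h3⟩ := ih (step + step) (q0 + q0) (by rw [hs]; ring) (by omega) hd hfuel'
      exact ⟨q, by simp only [remDivInnerB, if_pos hd]; exact hres, h1, h2, h3⟩
    · refine ⟨q0, ?_, hq, by rw [hs] at hsr; exact hsr, by rw [hs] at hd; omega⟩
      simp only [remDivInnerB]
      rw [if_neg hd, hs]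

-- B's outer loop: with enough fuel it returns (c + k, r - a*k) with the final remainder below a,
-- nonnegative whenever the loop ran, and k = 0 when it did not.
theorem remDivOuterB_spec (a : Int) (ha : 0 < a) (m : Nat) :
    ∀ (n : Nat) (r c : Int), r < a * n → r < a * 2 ^ m →
      ∃ k : Int, remDivOuterB a m n r c = (c + k, r - a * k) ∧ 0 ≤ k ∧ r - a * k < a ∧
        (a ≤ r → 0 ≤ r - a * k) ∧ (¬ a ≤ r → k = 0) := by
  intro n
  induction n with
  | zero =>
    intro r c hn _
    simp only [Nat.cast_zero, mul_zero] at hn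
    refine ⟨0, by simp [remDivOuterB], by omega, by omega, by omega, fun _ => rfl⟩
  | succ n ih =>
    intro r c hn hm
    by_cases hr : a ≤ r
    · obtain ⟨q, hin, hq1, hql, hqu⟩ :=
        remDivInnerB_spec a r ha m a 1 (by ring) le_rfl hr hm
      have hr' : r - a * q < a * n := by
        have h1 : a * ((n : Int) + 1) = a * n + a := by ring
        have h2 : a * 1 ≤ a * q := by
          apply mul_le_mul_of_nonneg_left hq1 (by omega)
        push_cast at hn
        omega
      have hm' : r - a * q < a * 2 ^ m := by omega
      obtain ⟨k', hres, hk0, hlt, hge, hz⟩ := ih (r - a * q) (c + q) hr' hm'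
      refine ⟨q + k', ?_, by omega, ?_, ?_, fun hc => absurd hr hc⟩
      · simp only [remDivOuterB, if_pos hr, hin]
        rw [hres]
        simp only [Prod.mk.injEq]
        constructor <;> ring
      · have hrk : a * (q + k') = a * q + a * k' := by ring
        omega
      · intro _
        have hrk : a * (q + k') = a * q + a * k' := by ring
        by_cases hr' : a ≤ r - a * q
        · have := hge hr'
          omega
        · have hz0 := hz hr'
          subst hz0
          have h00 : a * (q + 0) = a * q + a * 0 := by ring
          have h01 : a * (0:Int) = 0 := by ring
          omega
    · exact ⟨0, by simp [remDivOuterB, if_neg hr], by omega, by omega, fun hc => absurd hc hr,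
        fun _ => rfl⟩

-- uniqueness of quotient and remainder
theorem quotRem_unique (a k1 k2 r1 r2 : Int) (ha : 0 < a)
    (h : a * k1 + r1 = a * k2 + r2) (h1 : 0 ≤ r1) (h1' : r1 < a) (h2 : 0 ≤ r2) (h2' : r2 < a) :
    k1 = k2 ∧ r1 = r2 := by
  have hd : a * (k1 - k2) = r2 - r1 := by ring_nf; omega
  rcases lt_trichotomy k1 k2 with hlt | heq | hgt
  · have : a * (k1 - k2) ≤ a * (-1) := mul_le_mul_of_nonneg_left (by omega) (by omega)
    omega
  · constructor
    · exact heq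
    · subst heq; omega
  · have : a * 1 ≤ a * (k1 - k2) := mul_le_mul_of_nonneg_left (by omega) (by omega)
    omega

-- ===== VERDICT (by name: the statement is the Claim_ definition above) =====
theorem remainder_division_spec : Claim_equal_remainder_division := by
  intro a b _ hpre
  unfold Spec_remainder_division remainder_division remainder_division_alt
  by_cases hab : a ≤ b
  · have ha : 0 < a := by
      rcases hpre with h | h
      · exact h
      · omega
    have hb0 : 0 ≤ b := by omega
    have hbt : (b.toNat : Int) = b := Int.toNat_of_nonneg hb0
    -- A side
    have hfA : b - a < a * ((b.toNat + 1 : Nat) : Int) := by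
      have h1 : (1:Int) * ((b.toNat + 1 : Nat) : Int) ≤ a * ((b.toNat + 1 : Nat) : Int) := by
        apply mul_le_mul_of_nonneg_right (by omega) (by positivity)
      push_cast at h1 ⊢
      omega
    obtain ⟨k, hA, hk0, hAlt, hAle, _⟩ := remDivLoopA_spec a b ha (b.toNat + 1) a 0 hfA
    -- B side
    have hfB : b < a * ((b.toNat + 1 : Nat) : Int) := by
      have h1 : (1:Int) * ((b.toNat + 1 : Nat) : Int) ≤ a * ((b.toNat + 1 : Nat) : Int) := by
        apply mul_le_mul_of_nonneg_right (by omega) (by positivity)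
      push_cast at h1 ⊢
      omega
    have hfB2 : b < a * 2 ^ (b.toNat + 1) := by
      have h2 : (b.toNat : ℤ) < (2:ℤ) ^ b.toNat := by
        exact_mod_cast Nat.lt_two_pow_self
      have h3 : (2:ℤ) ^ b.toNat ≤ (2:ℤ) ^ (b.toNat + 1) := by
        apply pow_le_pow_right₀ (by norm_num) (by omega)
      have h4 : (1:Int) * (2:ℤ) ^ (b.toNat + 1) ≤ a * 2 ^ (b.toNat + 1) := by
        apply mul_le_mul_of_nonneg_right (by omega) (by positivity)
      omega
    obtain ⟨k', hB, hk0', hBlt, hBge, _⟩ :=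
      remDivOuterB_spec a ha (b.toNat + 1) (b.toNat + 1) b 0 hfB hfB2
    show ((remDivLoopA a b (b.toNat + 1) a 0).1,
        b - ((remDivLoopA a b (b.toNat + 1) a 0).2 - a)) =
      remDivOuterB a (b.toNat + 1) (b.toNat + 1) b 0
    rw [hA, hB]
    -- both are the unique quotient/remainder of b by a
    have hremA0 : 0 ≤ b - a * k := by
      have := hAle hab
      omega
    have hremA1 : b - a * k < a := by omega
    have hremB0 : 0 ≤ b - a * k' := hBge hab
    have huniq := quotRem_unique a k k' (b - a * k) (b - a * k') ha (by ring) hremA0 hremA1 hremB0 hBlt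
    simp only [zero_add, Prod.mk.injEq]
    constructor
    · omega
    · have : b - (a + a * k - a) = b - a * k := by ring
      omega
  · -- loop body never runs in either program: A returns (0, b - (a - a)) = (0, b), B returns (0, b)
    simp [remDivLoopA, remDivOuterB, if_neg hab]
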